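-- pv_equiv track=rewrite | github.com/lenardflx/EiP1_Excersises | 2024-11-26 Blatt 5/HeavyMetalUmlaute.py | replace_second_vowel_by_type
-- ===== SOURCE A (Python) =====
-- UMLAUTS = {"a": "ä", "o": "ö", "u": "ü"}
--
-- def replace_second_vowel_by_type(text):
--     def edit_word(word):
--         c, done, res = {"a": 0, "o": 0, "u": 0}, False, ""
--         for l in word:
--             if l.lower() in UMLAUTS and not done:
--                 c[l.lower()] += 1
--                 if c[l.lower()] == 2:
--                     l = UMLAUTS[l.lower()].upper() if l.isupper() else UMLAUTS[l.lower()]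
--                     done = True
--             res += l
--         return res
--     return " ".join(map(edit_word, text.split()))
-- ===== SOURCE B (Python) =====
-- UMLAUTS2 = {"a": ("ä", "Ä"), "o": ("ö", "Ö"), "u": ("ü", "Ü")}
--
-- def replace_second_vowel_by_type(text):
--     def edit_word(word):
--         low = word.lower()
--         seconds = []
--         for v in UMLAUTS2:
--             idxs = [i for i, ch in enumerate(low) if ch == v]
--             if len(idxs) >= 2:
--                 seconds.append(idxs[1])
--         if not seconds:
--             return word
--         i = min(seconds)
--         small, big = UMLAUTS2[low[i]]
--         return word[:i] + (big if word[i].isupper() else small) + word[i+1:]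
--     return " ".join(edit_word(w) for w in text.split())
-- ===== Notes on version B (the rewrite author's own statement) =====
-- stated objective: alternative
-- what changed: A scans each word character-by-character with a per-vowel count dict and a done flag, rebuilding the string as it goes; B instead computes the index list of each vowel's occurrences in the lowered word, takes the earliest second-occurrence index, and performs a single slice-splice with a case-matched umlaut table.
import Mathlib
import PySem

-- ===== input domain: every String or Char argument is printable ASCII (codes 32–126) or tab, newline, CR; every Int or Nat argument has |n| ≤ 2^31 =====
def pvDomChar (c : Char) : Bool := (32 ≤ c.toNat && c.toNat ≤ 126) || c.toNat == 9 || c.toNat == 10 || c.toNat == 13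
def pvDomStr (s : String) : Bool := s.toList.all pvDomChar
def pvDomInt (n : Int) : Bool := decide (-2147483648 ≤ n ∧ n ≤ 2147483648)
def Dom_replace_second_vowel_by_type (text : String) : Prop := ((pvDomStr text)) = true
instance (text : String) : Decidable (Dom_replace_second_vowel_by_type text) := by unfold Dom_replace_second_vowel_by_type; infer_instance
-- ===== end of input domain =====

-- B replaces A's per-character counting loop by an index-list decomposition (positions of each
-- vowel, earliest second occurrence, one slice-splice per word); objective: alternative.


-- ===== PORT A =====
def pvUmlauts : PySem.Dict Char Char := PySem.Dict.mk [('a', 'ä'), ('o', 'ö'), ('u', 'ü')]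

-- hand port of str.upper() on the non-ASCII UMLAUTS values (PySem.Chars.upperChar covers ASCII); exact on the three values that occur
def pvUmlUpper (c : Char) : Char :=
  if c = 'ä' then 'Ä' else if c = 'ö' then 'Ö' else if c = 'ü' then 'Ü' else c

def pvStepA (st : PySem.Dict Char Int × Bool × List Char) (l : Char) :
    PySem.Dict Char Int × Bool × List Char :=
  let ll := PySem.Chars.lowerChar l
  if pvUmlauts.contains ll && !st.2.1 then
    let c := st.1.insert ll (st.1.getD ll 0 + 1)
    if c.getD ll 0 == 2 then
      (c, true, st.2.2 ++ [if PySem.Chars.isupper l then pvUmlUpper (pvUmlauts.getD ll l)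
                           else pvUmlauts.getD ll l])
    else (c, st.2.1, st.2.2 ++ [l])
  else (st.1, st.2.1, st.2.2 ++ [l])

def pvEditWordA (word : List Char) : List Char :=
  (word.foldl pvStepA (PySem.Dict.mk [('a', 0), ('o', 0), ('u', 0)], false, [])).2.2

def replace_second_vowel_by_type (text : String) : String :=
  PySem.Str.join " " ((PySem.Str.split₀ text).map (fun w => String.ofList (pvEditWordA w.toList)))

-- ===== PORT B =====
def pvUmlauts2 : PySem.Dict Char (Char × Char) :=
  PySem.Dict.mk [('a', ('ä', 'Ä')), ('o', ('ö', 'Ö')), ('u', ('ü', 'Ü'))]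

def pvEditWordB (word : List Char) : List Char :=
  let low := PySem.Chars.lower word
  let seconds : List Int :=
    pvUmlauts2.keys.foldl
      (fun acc v =>
        let idxs : List Int :=
          (PySem.List.enumerate low).foldl
            (fun a p => if p.2 == v then a ++ [p.1] else a) []
        if 2 ≤ idxs.length then acc ++ [PySem.List.pyGetD idxs 1 0] else acc) []
  if seconds.isEmpty then word
  else
    match PySem.List.min? seconds (fun x => x) with
    | none => word
    | some i =>
      let ch := PySem.List.pyGetD low i ' '
      let pr := pvUmlauts2.getD ch (' ', ' ')
      let wci := PySem.List.pyGetD word i ' '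
      PySem.List.slice word none (some i)
        ++ [if PySem.Chars.isupper wci then pr.2 else pr.1]
        ++ PySem.List.slice word (some (i + 1)) none

def replace_second_vowel_by_type_alt (text : String) : String :=
  PySem.Str.join " " ((PySem.Str.split₀ text).map (fun w => String.ofList (pvEditWordB w.toList)))

-- ===== PRECONDITION & SPEC =====
def Spec_replace_second_vowel_by_type (text : String) (out : String) : Prop := out = replace_second_vowel_by_type_alt text
instance (text : String) (out : String) : Decidable (Spec_replace_second_vowel_by_type text out) := by unfold Spec_replace_second_vowel_by_type; infer_instance

-- ===== CLAIM (what is proved, stated in full; the proofs are below) =====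
def Claim_equal_replace_second_vowel_by_type : Prop := ∀ (text : String), Dom_replace_second_vowel_by_type text → Spec_replace_second_vowel_by_type text (replace_second_vowel_by_type text)

-- ===== LEMMAS AND PROOFS =====
def pvRep (l : Char) : Char :=
  if PySem.Chars.isupper l then pvUmlUpper (pvUmlauts.getD (PySem.Chars.lowerChar l) l)
  else pvUmlauts.getD (PySem.Chars.lowerChar l) l

def pvPb (seen : List Char) (lw : List Char) (i : Nat) : Bool :=
  match lw[i]? with
  | some v => pvUmlauts.contains v && (seen.contains v || (lw.take i).contains v)
  | none => false

def pvFirstRep (seen lw : List Char) : Option Nat := (List.range lw.length).find? (pvPb seen lw)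

def pvSplice (w : List Char) : Option Nat → List Char
  | none => w
  | some i => w.take i ++ [pvRep (w.getD i ' ')] ++ w.drop (i + 1)

theorem pvPb_cons_succ (ll : Char) (lw' seen : List Char) (j : Nat) :
    pvPb seen (ll :: lw') (j + 1)
      = pvPb (if pvUmlauts.contains ll then ll :: seen else seen) lw' j := by
  unfold pvPb
  simp only [List.getElem?_cons_succ, List.take_succ_cons]
  cases h : lw'[j]? with
  | none => rfl
  | some v =>
    by_cases hv : pvUmlauts.contains ll
    · simp [hv, List.contains_cons]
      by_cases hvl : v = ll <;> simp [hvl] <;> tauto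
    · simp [hv]
      by_cases hvl : v = ll
      · subst hvl; simp [hv]
      · simp [List.contains_cons, hvl]

theorem pvPb_zero (ll : Char) (lw' seen : List Char) :
    pvPb seen (ll :: lw') 0 = (pvUmlauts.contains ll && seen.contains ll) := by
  simp [pvPb]

theorem pvFindRange_succ (p : Nat → Bool) (n : Nat) :
    (List.range (n + 1)).find? p
      = if p 0 then some 0 else ((List.range n).find? (fun j => p (j + 1))).map (· + 1) := by
  rw [List.range_succ_eq_map, List.find?_cons]
  cases h : p 0 with
  | true => simp [h]
  | false =>
    simp only [h, List.find?_map]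
    rfl

theorem pvFindRange (p : Nat → Bool) (n m : Nat) :
    (List.range n).find? p = some m ↔ (m < n ∧ p m = true ∧ ∀ j < m, p j = false) := by
  induction n with
  | zero => simp
  | succ n ih =>
    rw [List.range_succ, List.find?_append]
    constructor
    · intro h
      rcases ho : (List.range n).find? p with _ | m'
      · rw [ho] at h
        simp only [Option.none_or, List.find?_cons] at h
        have hnone := List.find?_eq_none.mp ho
        cases hpn : p n with
        | false => rw [hpn] at h; simp at h
        | true =>
          rw [hpn] at h
          simp only [Option.some.injEq] at h
          subst h
          exact ⟨by omega, hpn, fun j hj => by simpa using hnone j (by simpa using hj)⟩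
      · rw [ho] at h
        simp only [Option.or_some, Option.some_or, Option.some.injEq] at h
        subst h
        have := ih.mp ho
        exact ⟨by omega, this.2.1, this.2.2⟩
    · rintro ⟨h1, h2, h3⟩
      by_cases hm : m < n
      · rw [ih.mpr ⟨hm, h2, h3⟩]; rfl
      · have hm' : m = n := by omega
        have hn : (List.range n).find? p = none :=
          List.find?_eq_none.mpr (fun j hj => by simp [h3 j (by rw [hm']; simpa using hj)])
        rw [hn]
        simp only [Option.none_or, List.find?_cons]
        rw [← hm']
        simp [h2]

theorem pvFirstRep_cons (ll : Char) (lw' seen : List Char) :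
    pvFirstRep seen (ll :: lw')
      = if pvUmlauts.contains ll && seen.contains ll then some 0
        else (pvFirstRep (if pvUmlauts.contains ll then ll :: seen else seen) lw').map (· + 1) := by
  unfold pvFirstRep
  rw [List.length_cons, pvFindRange_succ, pvPb_zero]
  simp only [pvPb_cons_succ]

theorem pvFoldA_done (w : List Char) (c : PySem.Dict Char Int) (res : List Char) :
    w.foldl pvStepA (c, true, res) = (c, true, res ++ w) := by
  induction w generalizing res with
  | nil => simp
  | cons l t ih => simp [pvStepA, ih]

theorem pvSplice_cons_map (l : Char) (w : List Char) (o : Option Nat) :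
    pvSplice (l :: w) (o.map (· + 1)) = l :: pvSplice w o := by
  cases o with
  | none => rfl
  | some i => simp [pvSplice]

theorem pvFoldA_main (w : List Char) (seen : List Char) (c : PySem.Dict Char Int) (res : List Char)
    (hc : ∀ v, pvUmlauts.contains v = true → c.getD v 0 = (if seen.contains v then 1 else 0)) :
    (w.foldl pvStepA (c, false, res)).2.2 = res ++ pvSplice w (pvFirstRep seen (PySem.Chars.lower w)) := by
  induction w generalizing seen c res with
  | nil => simp [pvFirstRep, PySem.Chars.lower, pvSplice]
  | cons l t ih =>
    have hlow : PySem.Chars.lower (l :: t) = PySem.Chars.lowerChar l :: PySem.Chars.lower t := rfl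
    rw [hlow, pvFirstRep_cons, List.foldl_cons]
    by_cases hv : pvUmlauts.contains (PySem.Chars.lowerChar l) = true
    · by_cases hs : seen.contains (PySem.Chars.lowerChar l) = true
      · -- second occurrence: trigger
        have hstep : pvStepA (c, false, res) l =
            (c.insert (PySem.Chars.lowerChar l) (c.getD (PySem.Chars.lowerChar l) 0 + 1), true,
             res ++ [pvRep l]) := by
          simp only [pvStepA, hv, Bool.not_false, Bool.and_true, if_pos hv]
          rw [hc _ hv, if_pos hs]
          simp [PySem.Dict.getD_insert, pvRep]
        rw [hstep, pvFoldA_done]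
        have hs' : PySem.Chars.lowerChar l ∈ seen := by simpa using hs
        simp [hv, hs', pvSplice]
      · -- first occurrence of this vowel
        have hs' : seen.contains (PySem.Chars.lowerChar l) = false := by
          simpa using hs
        have hgd : c.getD (PySem.Chars.lowerChar l) 0 = 0 := by
          rw [hc _ hv, if_neg (by simp [hs'] at hs ⊢; simpa using hs')]
        have hstep : pvStepA (c, false, res) l =
            (c.insert (PySem.Chars.lowerChar l) (c.getD (PySem.Chars.lowerChar l) 0 + 1), false,
             res ++ [l]) := by
          simp only [pvStepA, hv, Bool.not_false, Bool.and_true, if_pos hv]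
          rw [hgd]
          simp [PySem.Dict.getD_insert]
        rw [hstep]
        have hcond : (pvUmlauts.contains (PySem.Chars.lowerChar l)
            && seen.contains (PySem.Chars.lowerChar l)) = false := by
          rw [hs', Bool.and_false]
        rw [hcond, if_neg (by simp), if_pos hv, pvSplice_cons_map]
        have hc' : ∀ v, pvUmlauts.contains v = true →
            (c.insert (PySem.Chars.lowerChar l) (c.getD (PySem.Chars.lowerChar l) 0 + 1)).getD v 0
              = (if (PySem.Chars.lowerChar l :: seen).contains v = true then 1 else 0) := by
          intro v hvv
          rw [PySem.Dict.getD_insert]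
          by_cases hve : v = PySem.Chars.lowerChar l
          · rw [if_pos hve, hgd]
            simp [hve]
          · rw [if_neg hve, hc _ hvv]
            simp [List.contains_cons, hve]
        rw [ih _ _ _ hc']
        simp
    · -- not a vowel
      have hstep : pvStepA (c, false, res) l = (c, false, res ++ [l]) := by
        simp [pvStepA, hv]
      rw [hstep]
      have hcond : (pvUmlauts.contains (PySem.Chars.lowerChar l)
          && seen.contains (PySem.Chars.lowerChar l)) = false := by
        rw [Bool.eq_false_iff.mpr hv, Bool.false_and]
      rw [hcond, if_neg (by simp), if_neg hv, pvSplice_cons_map, ih _ _ _ hc]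
      simp

theorem pvEditWordA_eq (w : List Char) :
    pvEditWordA w = pvSplice w (pvFirstRep [] (PySem.Chars.lower w)) := by
  unfold pvEditWordA
  rw [pvFoldA_main w [] _ []]
  · simp
  · intro v hv
    have : 'a' = v ∨ 'o' = v ∨ 'u' = v := by
      simpa [pvUmlauts, PySem.Dict.contains_mk] using hv
    rcases this with h | h | h <;> subst h <;> decide

def pvOcc (v : Char) (lw : List Char) : List Int :=
  ((PySem.List.enumerate lw).filter (fun p => p.2 == v)).map (·.1)

theorem pvMem_occ (v : Char) (lw : List Char) (x : Int) :
    x ∈ pvOcc v lw ↔ ∃ k : Nat, k < lw.length ∧ x = (k : Int) ∧ lw[k]? = some v := by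
  unfold pvOcc
  simp only [List.mem_map, List.mem_filter, PySem.List.mem_enumerate_iff]
  constructor
  · rintro ⟨p, ⟨⟨k, hk, rfl⟩, hpv⟩, rfl⟩
    exact ⟨k, hk, by simp, by rw [List.getElem?_eq_getElem hk]; simpa using hpv⟩
  · rintro ⟨k, hk, rfl, hke⟩
    refine ⟨((k : Int), lw[k]), ⟨⟨k, hk, by simp⟩, ?_⟩, rfl⟩
    have : lw[k] = v := by
      have := List.getElem?_eq_getElem hk
      rw [hke] at this; exact (Option.some.injEq _ _).mp this.symm
    simpa using this

theorem pvOcc_sorted (v : Char) (lw : List Char) : (pvOcc v lw).Pairwise (· < ·) := by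
  unfold pvOcc
  exact List.pairwise_map.mpr ((PySem.List.pairwise_lt_enumerate lw 0).filter _)

theorem pvMemTake (lw : List Char) (i j : Nat) (v : Char) (hj : j < i)
    (h : lw[j]? = some v) : v ∈ lw.take i := by
  have hx : (lw.take i)[j]? = some v := by
    rw [List.getElem?_take_of_lt hj]; exact h
  exact List.mem_of_getElem? hx

theorem pvTakeMem (lw : List Char) (i : Nat) (v : Char) (h : v ∈ lw.take i) :
    ∃ j, j < i ∧ lw[j]? = some v := by
  obtain ⟨j, hj, hje⟩ := List.getElem_of_mem h
  have hji : j < i := by simp [List.length_take] at hj; omega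
  refine ⟨j, hji, ?_⟩
  rw [← List.getElem?_take_of_lt hji, List.getElem?_eq_getElem hj, hje]

theorem pvKeys2_vowel (v : Char) (hv : v ∈ pvUmlauts2.keys) : pvUmlauts.contains v = true := by
  have : v = 'a' ∨ v = 'o' ∨ v = 'u' := by
    simpa [pvUmlauts2, PySem.Dict.keys_mk] using hv
  rcases this with h | h | h <;> subst h <;> decide

theorem pvVowel_keys2 (v : Char) (hv : pvUmlauts.contains v = true) : v ∈ pvUmlauts2.keys := by
  have : 'a' = v ∨ 'o' = v ∨ 'u' = v := by
    simpa [pvUmlauts, PySem.Dict.contains_mk] using hv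
  rcases this with h | h | h <;> subst h <;> decide

-- the second listed occurrence of a vowel is a "repeat vowel" position

theorem pvOcc_second_pb (v : Char) (lw : List Char) (hvv : pvUmlauts.contains v = true)
    (a b : Int) (t : List Int) (hocc : pvOcc v lw = a :: b :: t) :
    ∃ k2 : Nat, b = (k2 : Int) ∧ k2 < lw.length ∧ pvPb [] lw k2 = true := by
  have hb : b ∈ pvOcc v lw := by rw [hocc]; simp
  have ha : a ∈ pvOcc v lw := by rw [hocc]; simp
  obtain ⟨k2, hk2, rfl, hke2⟩ := (pvMem_occ v lw b).mp hb
  obtain ⟨k1, hk1, rfl, hke1⟩ := (pvMem_occ v lw a).mp ha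
  have hab : (k1 : Int) < (k2 : Int) := by
    have := pvOcc_sorted v lw
    rw [hocc] at this
    exact (List.pairwise_cons.mp this).1 _ (by simp)
  have hk12 : k1 < k2 := by exact_mod_cast hab
  refine ⟨k2, rfl, hk2, ?_⟩
  unfold pvPb
  rw [hke2]
  have : v ∈ lw.take k2 := pvMemTake lw k2 k1 v hk12 hke1
  simp [hvv, this]

def pvSecs (lw : List Char) : List Int :=
  (pvUmlauts2.keys.filter (fun v => decide (2 ≤ (pvOcc v lw).length))).map
    (fun v => PySem.List.pyGetD (pvOcc v lw) 1 0)

theorem pvPyGetD_one (a b : Int) (t : List Int) : PySem.List.pyGetD (a :: b :: t) 1 0 = b := by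
  simpa using PySem.List.pyGetD_natCast (a :: b :: t) 1 0

theorem pvFirstRep_none_spec (lw : List Char) (h : pvFirstRep [] lw = none) :
    ∀ j < lw.length, pvPb [] lw j = false := by
  intro j hj
  have := List.find?_eq_none.mp h j (by simpa using hj)
  simpa using this

theorem pvFirstRep_some_spec (lw : List Char) (m : Nat) (h : pvFirstRep [] lw = some m) :
    m < lw.length ∧ pvPb [] lw m = true ∧ ∀ j < m, pvPb [] lw j = false :=
  (pvFindRange (pvPb [] lw) lw.length m).mp h

theorem pvSeconds_nil (lw : List Char) (h : pvFirstRep [] lw = none) : pvSecs lw = [] := by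
  have hnop := pvFirstRep_none_spec lw h
  unfold pvSecs
  rw [List.filter_eq_nil_iff.mpr, List.map_nil]
  intro v hv
  simp only [decide_eq_true_eq, not_le]
  by_contra hlen
  rw [Nat.not_lt] at hlen
  obtain ⟨a, b, t, hocc⟩ : ∃ a b t, pvOcc v lw = a :: b :: t := by
    rcases ho : pvOcc v lw with _ | ⟨a, rest⟩
    · rw [ho] at hlen; simp at hlen
    · rcases rest with _ | ⟨b, t⟩
      · rw [ho] at hlen; simp at hlen
      · exact ⟨a, b, t, rfl⟩
  obtain ⟨k2, _, hk2, hpb⟩ := pvOcc_second_pb v lw (pvKeys2_vowel v hv) a b t hocc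
  rw [hnop k2 hk2] at hpb
  exact Bool.false_ne_true hpb

theorem pvSeconds_ge (lw : List Char) (m : Nat) (h : pvFirstRep [] lw = some m) :
    ∀ s ∈ pvSecs lw, (m : Int) ≤ s := by
  obtain ⟨hm, hpm, hmin⟩ := pvFirstRep_some_spec lw m h
  intro s hs
  unfold pvSecs at hs
  simp only [List.mem_map, List.mem_filter, decide_eq_true_eq] at hs
  obtain ⟨v, ⟨hvk, hlen⟩, rfl⟩ := hs
  obtain ⟨a, b, t, hocc⟩ : ∃ a b t, pvOcc v lw = a :: b :: t := by
    rcases ho : pvOcc v lw with _ | ⟨a, rest⟩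
    · rw [ho] at hlen; simp at hlen
    · rcases rest with _ | ⟨b, t⟩
      · rw [ho] at hlen; simp at hlen
      · exact ⟨a, b, t, rfl⟩
  rw [hocc, pvPyGetD_one]
  obtain ⟨k2, rfl, hk2, hpb⟩ := pvOcc_second_pb v lw (pvKeys2_vowel v hvk) a b t hocc
  have : ¬ k2 < m := fun hlt => Bool.false_ne_true ((hmin k2 hlt) ▸ hpb)
  exact_mod_cast Nat.le_of_not_lt this

theorem pvSeconds_mem (lw : List Char) (m : Nat) (h : pvFirstRep [] lw = some m) :
    (m : Int) ∈ pvSecs lw := by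
  obtain ⟨hm, hpm, hmin⟩ := pvFirstRep_some_spec lw m h
  unfold pvPb at hpm
  rcases h0 : lw[m]? with _ | v0
  · rw [h0] at hpm; simp at hpm
  rw [h0] at hpm
  simp only [Bool.and_eq_true, Bool.or_eq_true] at hpm
  obtain ⟨hv0, htk⟩ := hpm
  have htk' : v0 ∈ lw.take m := by
    rcases htk with h | h
    · simp at h
    · simpa using h
  obtain ⟨a0, ha0m, ha0⟩ := pvTakeMem lw m v0 htk'
  have hmem : (m : Int) ∈ pvOcc v0 lw := (pvMem_occ v0 lw m).mpr ⟨m, hm, rfl, h0⟩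
  have hmem0 : (a0 : Int) ∈ pvOcc v0 lw :=
    (pvMem_occ v0 lw a0).mpr ⟨a0, by omega, rfl, ha0⟩
  obtain ⟨a, b, t, hocc⟩ : ∃ a b t, pvOcc v0 lw = a :: b :: t := by
    rcases ho : pvOcc v0 lw with _ | ⟨a, rest⟩
    · rw [ho] at hmem; simp at hmem
    · rcases rest with _ | ⟨b, t⟩
      · rw [ho] at hmem; rw [ho] at hmem0
        simp at hmem hmem0
        omega
      · exact ⟨a, b, t, rfl⟩
  -- b = m
  have hsort := pvOcc_sorted v0 lw
  rw [hocc] at hsort hmem hmem0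
  have hab : ∀ x ∈ b :: t, a < x := (List.pairwise_cons.mp hsort).1
  have hbt : ∀ x ∈ t, b < x := (List.pairwise_cons.mp (List.pairwise_cons.mp hsort).2).1
  have ham : a ≤ (a0 : Int) := by
    rcases List.mem_cons.mp hmem0 with rfl | hx
    · exact le_refl _
    · exact le_of_lt (hab _ hx)
  have hma : (m : Int) ≠ a := by
    have : (a0 : Int) < (m : Int) := by exact_mod_cast ha0m
    omega
  have hbm : b ≤ (m : Int) := by
    rcases List.mem_cons.mp hmem with h | h
    · exact absurd h hma
    · rcases List.mem_cons.mp h with rfl | hx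
      · exact le_refl _
      · exact le_of_lt (hbt _ hx)
  have hmb : (m : Int) ≤ b := by
    obtain ⟨k2, rfl, hk2, hpb⟩ := pvOcc_second_pb v0 lw hv0 a b t hocc
    have : ¬ k2 < m := fun hlt => Bool.false_ne_true ((hmin k2 hlt) ▸ hpb)
    exact_mod_cast Nat.le_of_not_lt this
  have hbm' : b = (m : Int) := le_antisymm hbm hmb
  unfold pvSecs
  simp only [List.mem_map, List.mem_filter, decide_eq_true_eq]
  refine ⟨v0, ⟨pvVowel_keys2 v0 hv0, by rw [hocc]; simp⟩, ?_⟩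
  rw [hocc, pvPyGetD_one, hbm']

theorem pvRepChar (l0 : Char) (hv : pvUmlauts.contains (PySem.Chars.lowerChar l0) = true) :
    (if PySem.Chars.isupper l0
       then (pvUmlauts2.getD (PySem.Chars.lowerChar l0) (' ', ' ')).2
       else (pvUmlauts2.getD (PySem.Chars.lowerChar l0) (' ', ' ')).1) = pvRep l0 := by
  unfold pvRep
  have h3 : 'a' = PySem.Chars.lowerChar l0 ∨ 'o' = PySem.Chars.lowerChar l0
      ∨ 'u' = PySem.Chars.lowerChar l0 := by
    simpa [pvUmlauts, PySem.Dict.contains_mk] using hv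
  rcases h3 with h | h | h <;> rw [← h] <;>
    cases PySem.Chars.isupper l0 <;>
      simp [pvUmlauts, pvUmlauts2, pvUmlUpper, PySem.Dict.getD_eq_get?_getD,
        PySem.Dict.get?_mk_cons]

theorem pvEditWordB_eq (w : List Char) :
    pvEditWordB w = pvSplice w (pvFirstRep [] (PySem.Chars.lower w)) := by
  have hinner : ∀ v : Char, (PySem.List.enumerate (PySem.Chars.lower w)).foldl
      (fun a p => if p.2 == v then a ++ [p.1] else a) [] = pvOcc v (PySem.Chars.lower w) := by
    intro v
    simpa [pvOcc] using PySem.List.foldl_append_if (fun p : Int × Char => p.2 == v)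
      (fun p : Int × Char => p.1) (PySem.List.enumerate (PySem.Chars.lower w)) []
  have hsec : pvUmlauts2.keys.foldl (fun acc v =>
        let idxs : List Int := (PySem.List.enumerate (PySem.Chars.lower w)).foldl
          (fun a p => if p.2 == v then a ++ [p.1] else a) []
        if 2 ≤ idxs.length then acc ++ [PySem.List.pyGetD idxs 1 0] else acc) []
      = pvSecs (PySem.Chars.lower w) := by
    have h1 : (fun (acc : List Int) (v : Char) =>
        let idxs : List Int := (PySem.List.enumerate (PySem.Chars.lower w)).foldl
          (fun a p => if p.2 == v then a ++ [p.1] else a) []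
        if 2 ≤ idxs.length then acc ++ [PySem.List.pyGetD idxs 1 0] else acc)
      = (fun acc v => if 2 ≤ (pvOcc v (PySem.Chars.lower w)).length
          then acc ++ [PySem.List.pyGetD (pvOcc v (PySem.Chars.lower w)) 1 0] else acc) := by
      funext acc v
      simp only [hinner v]
    rw [h1]
    simpa [pvSecs] using PySem.List.foldl_append_ite
      (fun v => 2 ≤ (pvOcc v (PySem.Chars.lower w)).length)
      (fun v => PySem.List.pyGetD (pvOcc v (PySem.Chars.lower w)) 1 0) pvUmlauts2.keys []
  unfold pvEditWordB
  simp only [hsec]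
  cases hfr : pvFirstRep [] (PySem.Chars.lower w) with
  | none =>
    rw [pvSeconds_nil _ hfr]
    simp [pvSplice]
  | some m =>
    have hmem := pvSeconds_mem _ m hfr
    have hge := pvSeconds_ge _ m hfr
    have hne : pvSecs (PySem.Chars.lower w) ≠ [] := List.ne_nil_of_mem hmem
    rw [if_neg (by simpa using hne)]
    obtain ⟨m', hm'⟩ : ∃ m', PySem.List.min? (pvSecs (PySem.Chars.lower w)) (fun x => x) = some m' := by
      rcases ho : PySem.List.min? (pvSecs (PySem.Chars.lower w)) (fun x => x) with _ | m'
      · exact absurd ((PySem.List.min?_eq_none_iff _ _).mp ho) hne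
      · exact ⟨m', rfl⟩
    have hmm : m' = (m : Int) :=
      le_antisymm (PySem.List.min?_isMin hm' _ hmem) (hge m' (PySem.List.min?_mem hm'))
    rw [hm', hmm]
    dsimp only
    obtain ⟨hm, hpm, _⟩ := pvFirstRep_some_spec _ m hfr
    have hmw : m < w.length := by
      simpa [PySem.Chars.lower] using hm
    -- the original character at m
    obtain ⟨l0, hl0⟩ : ∃ l0, w[m]? = some l0 :=
      ⟨w[m], List.getElem?_eq_getElem hmw⟩
    have hlow : (PySem.Chars.lower w)[m]? = some (PySem.Chars.lowerChar l0) := by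
      show (w.map PySem.Chars.lowerChar)[m]? = _
      rw [List.getElem?_map, hl0]
      rfl
    have hv0 : pvUmlauts.contains (PySem.Chars.lowerChar l0) = true := by
      unfold pvPb at hpm
      rw [hlow] at hpm
      simp only [Bool.and_eq_true] at hpm
      exact hpm.1
    have hchar : PySem.List.pyGetD (PySem.Chars.lower w) (m : Int) ' '
        = PySem.Chars.lowerChar l0 := by
      rw [PySem.List.pyGetD_natCast]
      simp [List.getD_eq_getElem?_getD, hlow]
    have hwchar : PySem.List.pyGetD w (m : Int) ' ' = l0 := by
      rw [PySem.List.pyGetD_natCast]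
      simp [List.getD_eq_getElem?_getD, hl0]
    rw [hchar, hwchar]
    have hslice1 : PySem.List.slice w none (some (m : Int)) = w.take m :=
      PySem.List.slice_to_natCast w m
    have hslice2 : PySem.List.slice w (some ((m : Int) + 1)) none = w.drop (m + 1) := by
      have : ((m : Int) + 1) = ((m + 1 : Nat) : Int) := by push_cast; ring
      rw [this]
      exact PySem.List.slice_from_natCast w (m + 1)
    rw [hslice1, hslice2, pvRepChar l0 hv0]
    unfold pvSplice
    have hgd : w.getD m ' ' = l0 := by simp [List.getD_eq_getElem?_getD, hl0]
    dsimp only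
    rw [hgd]

theorem pvEditWord_eq (w : List Char) : pvEditWordA w = pvEditWordB w := by
  rw [pvEditWordA_eq, pvEditWordB_eq]

-- ===== VERDICT (by name: the statement is the Claim_ definition above) =====
theorem replace_second_vowel_by_type_spec : Claim_equal_replace_second_vowel_by_type := by
  intro text _
  unfold Spec_replace_second_vowel_by_type replace_second_vowel_by_type replace_second_vowel_by_type_alt
  congr 1
  exact List.map_congr_left (fun s _ => by rw [pvEditWord_eq])
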